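-- pv_equiv track=rewrite | github.com/nickconstantinou/content-crawler | category_processor.py | get_next_category
-- ===== SOURCE A (Python) =====
-- def get_next_category(sources, state):
--     """Get the next category to process"""
--     channels = sources.get("youtube", {}).get("channels", [])
--
--     # Build category list
--     categories = {}
--     for channel in channels:
--         cat = channel.get("category", "General")
--         if cat not in categories:
--             categories[cat] = []
--         categories[cat].append(channel)
--
--     # Get category list
--     category_list = list(categories.keys())
--
--     # Find next unprocessed category
--     last = state.get("last_category")
--     if last and last in category_list:
--         idx = category_list.index(last)
--         next_idx = (idx + 1) % len(category_list)
--         return category_list[next_idx], categories[category_list[next_idx]]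
--
--     # Start from beginning
--     if category_list:
--         return category_list[0], categories[category_list[0]]
--
--     return None, []
-- ===== SOURCE B (Python) =====
-- def get_next_category(sources, state):
--     """Get the next category to process"""
--     channels = sources.get("youtube", {}).get("channels", [])
--     # one dedup pass for the ordered distinct categories; no grouping map
--     cats = list(dict.fromkeys(ch.get("category", "General") for ch in channels))
--     if not cats:
--         return None, []
--     last = state.get("last_category")
--     idx = 0
--     if last and last in cats:
--         idx = (cats.index(last) + 1) % len(cats)
--     target = cats[idx]
--     return target, [ch for ch in channels if ch.get("category", "General") == target]
-- ===== Notes on version B (the rewrite author's own statement) =====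
-- stated objective: alternative
-- what changed: B replaces A's category->channels grouping dict by a single ordered-dedup pass over the category names, picks the target with the same cyclic rule, and builds only the chosen category's channel list with one filter pass.
import Mathlib
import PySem

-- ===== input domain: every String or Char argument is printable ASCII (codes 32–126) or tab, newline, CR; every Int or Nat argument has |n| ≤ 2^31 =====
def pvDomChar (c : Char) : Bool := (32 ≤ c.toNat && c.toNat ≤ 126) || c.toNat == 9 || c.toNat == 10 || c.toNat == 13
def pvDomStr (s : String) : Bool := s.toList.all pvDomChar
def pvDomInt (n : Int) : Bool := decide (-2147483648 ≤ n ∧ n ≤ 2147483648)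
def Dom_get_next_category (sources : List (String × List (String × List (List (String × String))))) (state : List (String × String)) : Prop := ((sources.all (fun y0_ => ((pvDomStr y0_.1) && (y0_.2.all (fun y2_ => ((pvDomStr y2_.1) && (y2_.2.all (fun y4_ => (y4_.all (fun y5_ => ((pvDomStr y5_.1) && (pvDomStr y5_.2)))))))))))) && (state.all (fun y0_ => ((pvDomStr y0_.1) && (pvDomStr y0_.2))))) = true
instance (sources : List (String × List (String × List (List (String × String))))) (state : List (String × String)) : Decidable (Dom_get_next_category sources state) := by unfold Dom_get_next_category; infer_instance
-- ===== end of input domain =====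

-- B replaces A's category→channels grouping dict by one ordered-dedup pass over category
-- names plus a single filter for the chosen category; same return value (alternative decomposition).

-- ===== PORT A =====
def get_next_category (sources : List (String × List (String × List (List (String × String))))) (state : List (String × String)) : Option String × (List (List (String × String))) :=
  let channels := (PySem.Dict.mk ((PySem.Dict.mk sources).getD "youtube" [])).getD "channels" []
  let categories := channels.foldl (fun d ch =>
      let cat := (PySem.Dict.mk ch).getD "category" "General"
      let d' := if d.contains cat then d else d.insert cat []
      d'.insert cat (d'.getD cat [] ++ [ch])) PySem.Dict.empty
  let category_list := categories.keys
  match (PySem.Dict.mk state).get? "last_category" with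
  | some last =>
    if last ≠ "" ∧ last ∈ category_list then
      let idx : Int := ((PySem.List.index? category_list last).getD 0 : Nat)
      let next_idx := PySem.Int.mod (idx + 1) (category_list.length : Int)
      (some (PySem.List.pyGetD category_list next_idx ""),
       categories.getD (PySem.List.pyGetD category_list next_idx "") [])
    else if category_list ≠ [] then
      (some (PySem.List.pyGetD category_list (0 : Int) ""),
       categories.getD (PySem.List.pyGetD category_list (0 : Int) "") [])
    else (none, [])
  | none =>
    if category_list ≠ [] then
      (some (PySem.List.pyGetD category_list (0 : Int) ""),
       categories.getD (PySem.List.pyGetD category_list (0 : Int) "") [])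
    else (none, [])

-- ===== PORT B =====
def get_next_category_alt (sources : List (String × List (String × List (List (String × String))))) (state : List (String × String)) : Option String × (List (List (String × String))) :=
  let channels := (PySem.Dict.mk ((PySem.Dict.mk sources).getD "youtube" [])).getD "channels" []
  let cats := PySem.List.dedup (channels.map (fun ch => (PySem.Dict.mk ch).getD "category" "General"))
  if cats = [] then (none, [])
  else
    let idx : Int :=
      match (PySem.Dict.mk state).get? "last_category" with
      | some last =>
        if last ≠ "" ∧ last ∈ cats then
          PySem.Int.mod (((PySem.List.index? cats last).getD 0 : Nat) + 1) (cats.length : Int)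
        else 0
      | none => 0
    let target := PySem.List.pyGetD cats idx ""
    (some target, channels.filter (fun ch => (PySem.Dict.mk ch).getD "category" "General" == target))

-- ===== PRECONDITION & SPEC =====
def Spec_get_next_category (sources : List (String × List (String × List (List (String × String))))) (state : List (String × String)) (out : Option String × (List (List (String × String)))) : Prop := out = get_next_category_alt sources state
instance (sources : List (String × List (String × List (List (String × String))))) (state : List (String × String)) (out : Option String × (List (List (String × String)))) : Decidable (Spec_get_next_category sources state out) := by unfold Spec_get_next_category; infer_instance

-- ===== CLAIM (what is proved, stated in full; the proofs are below) =====
def Claim_equal_get_next_category : Prop := ∀ (sources : List (String × List (String × List (List (String × String))))) (state : List (String × String)), Dom_get_next_category sources state → Spec_get_next_category sources state (get_next_category sources state)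

-- ===== LEMMAS AND PROOFS =====

-- A's loop body (ensure key, then append) is exactly Dict.modify with default [].
theorem stepA_eq_modify (d : PySem.Dict String (List (List (String × String)))) (ch : List (String × String)) :
    (let cat := (PySem.Dict.mk ch).getD "category" "General"
     let d' := if d.contains cat then d else d.insert cat []
     d'.insert cat (d'.getD cat [] ++ [ch])) =
      d.modify ((PySem.Dict.mk ch).getD "category" "General") [] (· ++ [ch]) := by
  show (let d' := if d.contains ((PySem.Dict.mk ch).getD "category" "General") then d
                  else d.insert ((PySem.Dict.mk ch).getD "category" "General") []
        d'.insert ((PySem.Dict.mk ch).getD "category" "General")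
          (d'.getD ((PySem.Dict.mk ch).getD "category" "General") [] ++ [ch])) = _
  set c := (PySem.Dict.mk ch).getD "category" "General" with hc
  by_cases h : d.contains c = true
  · simp only [h, if_pos]
    simp only [PySem.Dict.insert, PySem.Dict.contains, PySem.Dict.getD, PySem.Dict.get?,
      PySem.Dict.modify]
  · simp only [Bool.not_eq_true] at h
    simp only [h, Bool.false_eq_true, if_false]
    simp only [PySem.Dict.contains] at h
    have hne : ∀ p ∈ d.items, ¬ (p.1 == c) = true := by
      simpa [List.any_eq_false] using h
    have hf : List.find? (fun p => p.1 == c) d.items = none := List.find?_eq_none.mpr hne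
    have hmap : List.map (fun p => if p.1 = c then (c, ([ch] : List (List (String × String)))) else p) d.items = d.items := by
      rw [List.map_congr_left (g := id) (fun p hp => by simp [show p.1 ≠ c by simpa using hne p hp]), List.map_id]
    simp only [PySem.Dict.insert, PySem.Dict.contains, PySem.Dict.getD, PySem.Dict.get?,
      PySem.Dict.modify, h, Bool.false_eq_true, hf]
    simp [h, hf, List.any_append, hmap]

-- The grouping dict as a modify-fold.
theorem groupA_eq_modify_fold (channels : List (List (String × String))) :
    channels.foldl (fun d ch =>
      let cat := (PySem.Dict.mk ch).getD "category" "General"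
      let d' := if d.contains cat then d else d.insert cat []
      d'.insert cat (d'.getD cat [] ++ [ch])) PySem.Dict.empty =
    channels.foldl (fun d ch => d.modify ((PySem.Dict.mk ch).getD "category" "General") [] (· ++ [ch])) PySem.Dict.empty := by
  have h : (fun (d : PySem.Dict String (List (List (String × String)))) ch =>
      let cat := (PySem.Dict.mk ch).getD "category" "General"
      let d' := if d.contains cat then d else d.insert cat []
      d'.insert cat (d'.getD cat [] ++ [ch])) =
      (fun d ch => d.modify ((PySem.Dict.mk ch).getD "category" "General") [] (· ++ [ch])) :=
    funext fun d => funext fun ch => stepA_eq_modify d ch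
  rw [h]

theorem keys_groupA (channels : List (List (String × String))) :
    (channels.foldl (fun d ch => d.modify ((PySem.Dict.mk ch).getD "category" "General") [] (· ++ [ch])) PySem.Dict.empty).keys =
    PySem.List.dedup (channels.map (fun ch => (PySem.Dict.mk ch).getD "category" "General")) := by
  rw [PySem.Dict.keys_foldl_modify_key]
  simp [PySem.Set.update_nil_left]

theorem getD_groupA (channels : List (List (String × String))) (t : String) :
    (channels.foldl (fun d ch => d.modify ((PySem.Dict.mk ch).getD "category" "General") [] (· ++ [ch])) PySem.Dict.empty).getD t [] =
    channels.filter (fun ch => (PySem.Dict.mk ch).getD "category" "General" == t) := by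
  have h := List.foldl_map (f := fun ch : List (String × String) => ((PySem.Dict.mk ch).getD "category" "General", ch))
    (g := fun (d : PySem.Dict String (List (List (String × String)))) p => d.modify p.1 [] (· ++ [p.2]))
    (l := channels) (init := PySem.Dict.empty)
  simp only at h
  rw [← h, PySem.Dict.getD_foldl_modify_append]
  simp [List.filter_map, Function.comp_def, List.map_map]

-- ===== VERDICT (by name: the statement is the Claim_ definition above) =====
theorem get_next_category_spec : Claim_equal_get_next_category := by
  intro sources state _
  show get_next_category sources state = get_next_category_alt sources state
  unfold get_next_category get_next_category_alt
  simp only []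
  set channels := (PySem.Dict.mk ((PySem.Dict.mk sources).getD "youtube" [])).getD "channels" [] with hch
  rw [groupA_eq_modify_fold]
  set G := channels.foldl (fun d ch => d.modify ((PySem.Dict.mk ch).getD "category" "General") [] (· ++ [ch])) PySem.Dict.empty with hG
  have hkeys : G.keys = PySem.List.dedup (channels.map (fun ch => (PySem.Dict.mk ch).getD "category" "General")) := keys_groupA channels
  have hget : ∀ t, G.getD t [] = channels.filter (fun ch => (PySem.Dict.mk ch).getD "category" "General" == t) := getD_groupA channels
  rw [hkeys]
  set cats := PySem.List.dedup (channels.map (fun ch => (PySem.Dict.mk ch).getD "category" "General")) with hcats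
  match hlast : (PySem.Dict.mk state).get? "last_category" with
  | some last =>
    by_cases hc : last ≠ "" ∧ last ∈ cats
    · have hne : cats ≠ [] := fun h0 => (List.not_mem_nil (h0 ▸ hc.2)).elim
      simp [hc.1, hc.2, hne, hget]
    · by_cases hn : cats = []
      · simp [hn]
      · simp [hc, hn, hget]
  | none =>
    by_cases hn : cats = []
    · simp [hn]
    · simp [hn, hget]
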